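-- pv_equiv track=rewrite | github.com/ymtz13/CompetitiveProgramming | AtCoder/ARC129/A.py | f
-- ===== SOURCE A (Python) =====
-- def f(N, X):
--   a = 0
--   for i in range(60):
--     if N & (1 << i) == 0: continue
--     s = (1 << (i + 1)) - 1
--     m = (1 << i) - 1
--     a += max(0, min(s, X) - m)
--
--   return a
-- ===== SOURCE B (Python) =====
-- def f(N, X):
--     if X <= 0:
--         return 0
--     k = X.bit_length() - 1
--     if k >= 60:
--         return N & ((1 << 60) - 1)
--     a = N & ((1 << k) - 1)
--     if N & (1 << k):
--         a += X - (1 << k) + 1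
--     return a
-- ===== Notes on version B (the rewrite author's own statement) =====
-- stated objective: simpler
-- what changed: Replaces the 60-iteration scan over bit positions by a closed form: read k = X.bit_length()-1, mask N's low k bits, and add the boundary block X - 2^k + 1 if bit k of N is set.
import Mathlib
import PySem

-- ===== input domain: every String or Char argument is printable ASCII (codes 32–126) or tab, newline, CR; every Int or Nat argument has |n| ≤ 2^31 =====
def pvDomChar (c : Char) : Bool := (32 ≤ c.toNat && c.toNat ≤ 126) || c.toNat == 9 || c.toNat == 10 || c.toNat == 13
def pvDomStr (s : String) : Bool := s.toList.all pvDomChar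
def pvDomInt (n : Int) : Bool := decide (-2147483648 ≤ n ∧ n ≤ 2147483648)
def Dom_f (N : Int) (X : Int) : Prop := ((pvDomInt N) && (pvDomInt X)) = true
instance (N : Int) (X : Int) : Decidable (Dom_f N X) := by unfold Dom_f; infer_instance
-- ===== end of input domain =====

-- B replaces A's scan over 60 bit positions by a closed form read off X's bit length (objective: simpler).

-- ===== PORT A =====
-- literal port of A: for i in range(60): if N & (1 << i): a += max(0, min((1<<(i+1))-1, X) - ((1<<i)-1))
def f (N : Int) (X : Int) : Int :=
  (PySem.List.pyRange 0 60).foldl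
    (fun (a : Int) (i : Int) =>
      if PySem.Int.band N ((1 : Int) <<< i.toNat) = 0 then a
      else a + max (0 : Int) (min (((1 : Int) <<< (i.toNat + 1)) - 1) X - (((1 : Int) <<< i.toNat) - 1)))
    (0 : Int)

-- ===== PORT B =====
-- literal port of Source B (X.bit_length() is PySem.Int.bitLength; for X ≥ 1 it is ≥ 1, so Nat subtraction is exact)
def f_alt (N : Int) (X : Int) : Int :=
  if X ≤ 0 then 0
  else
    let k : Nat := PySem.Int.bitLength X - 1
    if 60 ≤ k then PySem.Int.band N (((1 : Int) <<< 60) - 1)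
    else
      let a := PySem.Int.band N (((1 : Int) <<< k) - 1)
      if PySem.Int.band N ((1 : Int) <<< k) ≠ 0 then a + (X - ((1 : Int) <<< k) + 1) else a

-- ===== PRECONDITION & SPEC =====
def Spec_f (N : Int) (X : Int) (out : Int) : Prop := out = f_alt N X
instance (N : Int) (X : Int) (out : Int) : Decidable (Spec_f N X out) := by unfold Spec_f; infer_instance

-- ===== CLAIM (what is proved, stated in full; the proofs are below) =====
def Claim_equal_f : Prop := ∀ (N : Int) (X : Int), Dom_f N X → Spec_f N X (f N X)

-- ===== LEMMAS AND PROOFS =====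

-- Python's 1 << n as an Int is 2^n
lemma pv_one_shiftLeft (n : Nat) : (1 : Int) <<< n = (2 : Int) ^ n := by
  rw [Int.shiftLeft_eq]; ring

lemma pv_cast_pow (n : Nat) : ((2 ^ n : Nat) : Int) = (2 : Int) ^ n := by push_cast; ring

-- a two's-complement AND with a single power of two is 0 or that power
lemma pv_band_two_pow (N : Int) (n : Nat) :
    PySem.Int.band N ((2 : Int) ^ n) = 0 ∨ PySem.Int.band N ((2 : Int) ^ n) = (2 : Int) ^ n := by
  rw [← pv_cast_pow]
  unfold PySem.Int.band
  by_cases h : 0 ≤ N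
  · rw [if_pos h, if_pos (Int.natCast_nonneg _)]
    simp only [Int.toNat_natCast]
    rw [Nat.and_two_pow]
    cases hb : N.toNat.testBit n <;> simp [hb, pv_cast_pow]
  · rw [if_neg h, if_pos (Int.natCast_nonneg _)]
    simp only [Int.toNat_natCast]
    rw [Nat.land_comm, Nat.and_two_pow]
    cases hb : (-N - 1).toNat.testBit n <;> simp [hb, pv_cast_pow]

-- masking one more bit adds exactly the AND with that bit's power
lemma pv_band_mask_succ (N : Int) (n : Nat) :
    PySem.Int.band N ((2 : Int) ^ (n + 1) - 1) =
    PySem.Int.band N ((2 : Int) ^ n - 1) + PySem.Int.band N ((2 : Int) ^ n) := by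
  have hp : 0 < 2 ^ n := Nat.pow_pos (by norm_num)
  have hc : ((2 : Int) ^ (n + 1) - 1) = (((2 ^ (n + 1) - 1 : Nat) : Int)) := by
    push_cast [Nat.one_le_two_pow]; ring
  have hc' : ((2 : Int) ^ n - 1) = (((2 ^ n - 1 : Nat) : Int)) := by
    push_cast [Nat.one_le_two_pow]; ring
  rw [hc, hc', ← pv_cast_pow]
  unfold PySem.Int.band
  have hm : ∀ M : Nat, M % 2 ^ (n + 1) = M % 2 ^ n + 2 ^ n * (M / 2 ^ n % 2) := fun M => Nat.mod_pow_succ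
  by_cases h : 0 ≤ N
  · rw [if_pos h, if_pos (Int.natCast_nonneg _), if_pos h, if_pos (Int.natCast_nonneg _),
      if_pos h, if_pos (Int.natCast_nonneg _)]
    simp only [Int.toNat_natCast]
    have key : N.toNat &&& (2 ^ (n + 1) - 1)
        = (N.toNat &&& (2 ^ n - 1)) + (N.toNat &&& 2 ^ n) := by
      rw [Nat.and_two_pow_sub_one_eq_mod, Nat.and_two_pow_sub_one_eq_mod, Nat.and_two_pow,
        Nat.testBit_eq_decide_div_mod_eq]
      have hM := hm N.toNat
      rcases (by omega : N.toNat / 2 ^ n % 2 = 0 ∨ N.toNat / 2 ^ n % 2 = 1) with ht | ht <;>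
        rw [ht] at hM ⊢ <;> norm_num <;> omega
    exact_mod_cast congrArg (Nat.cast : Nat → Int) key
  · rw [if_neg h, if_pos (Int.natCast_nonneg _), if_neg h, if_pos (Int.natCast_nonneg _),
      if_neg h, if_pos (Int.natCast_nonneg _)]
    simp only [Int.toNat_natCast]
    have key : 2 ^ (n + 1) - 1 - ((2 ^ (n + 1) - 1) &&& (-N - 1).toNat)
        = (2 ^ n - 1 - ((2 ^ n - 1) &&& (-N - 1).toNat)) + (2 ^ n - (2 ^ n &&& (-N - 1).toNat)) := by
      generalize (-N - 1).toNat = M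
      rw [Nat.land_comm (2 ^ (n + 1) - 1), Nat.land_comm (2 ^ n - 1), Nat.land_comm (2 ^ n),
        Nat.and_two_pow_sub_one_eq_mod, Nat.and_two_pow_sub_one_eq_mod, Nat.and_two_pow,
        Nat.testBit_eq_decide_div_mod_eq]
      have hM := hm M
      have hr1 : M % 2 ^ (n + 1) < 2 ^ (n + 1) := Nat.mod_lt _ (by positivity)
      have hr2 : M % 2 ^ n < 2 ^ n := Nat.mod_lt _ hp
      rcases (by omega : M / 2 ^ n % 2 = 0 ∨ M / 2 ^ n % 2 = 1) with ht | ht <;>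
        rw [ht] at hM ⊢ <;> norm_num <;> omega
    exact_mod_cast congrArg (Nat.cast : Nat → Int) key

-- the loop body of A's port, named for the invariant proofs
def pvBody (N X : Int) : Int → Int → Int := fun a i =>
  if PySem.Int.band N ((1 : Int) <<< i.toNat) = 0 then a
  else a + max (0 : Int) (min (((1 : Int) <<< (i.toNat + 1)) - 1) X - (((1 : Int) <<< i.toNat) - 1))

-- with X ≤ 0 every contribution is clamped to 0
lemma pv_loop_nonpos (N X : Int) (hX : X ≤ 0) : ∀ n : Nat,
    (PySem.List.pyRange 0 n).foldl (pvBody N X) 0 = 0 := by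
  intro n
  induction n with
  | zero => rw [show PySem.List.pyRange 0 ((0 : Nat) : Int) = [] by decide]; rfl
  | succ n ih =>
    rw [show (((n + 1 : Nat) : Int)) = (n : Int) + 1 by push_cast; ring,
      PySem.List.pyRange_one_succ_right (by positivity), List.foldl_append, ih]
    simp only [List.foldl, pvBody, pv_one_shiftLeft, Int.toNat_natCast]
    have h1 : (1 : Int) ≤ (2 : Int) ^ n := one_le_pow₀ (by norm_num)
    have hmin := min_le_right ((2 : Int) ^ (n + 1) - 1) X
    have : max (0 : Int) (min ((2 : Int) ^ (n + 1) - 1) X - ((2 : Int) ^ n - 1)) = 0 := by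
      rw [max_eq_left]; omega
    split <;> omega

-- the loop invariant: after scanning bits [0, n) the sum is the masked low bits plus the boundary block
lemma pv_loop_inv (N X : Int) (k : Nat)
    (h1 : (2 : Int) ^ k ≤ X) (h2 : X < (2 : Int) ^ (k + 1)) : ∀ n : Nat,
    (PySem.List.pyRange 0 n).foldl (pvBody N X) 0 =
      PySem.Int.band N ((2 : Int) ^ (min n k) - 1) +
      (if k < n ∧ PySem.Int.band N ((2 : Int) ^ k) ≠ 0 then X - (2 : Int) ^ k + 1 else 0) := by
  intro n
  induction n with
  | zero =>
    rw [show PySem.List.pyRange 0 ((0 : Nat) : Int) = [] by decide]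
    simp
  | succ n ih =>
    rw [show (((n + 1 : Nat) : Int)) = (n : Int) + 1 by push_cast; ring,
      PySem.List.pyRange_one_succ_right (by positivity), List.foldl_append, ih]
    simp only [List.foldl, pvBody, pv_one_shiftLeft, Int.toNat_natCast]
    have h1n : (1 : Int) ≤ (2 : Int) ^ n := one_le_pow₀ (by norm_num)
    have hpow : (2 : Int) ^ (n + 1) = 2 * (2 : Int) ^ n := by ring
    rcases lt_trichotomy n k with hnk | hnk | hnk
    · -- n < k : a full block of size 2^n is added iff bit n is set
      have hmin : min n k = n := min_eq_left (le_of_lt hnk)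
      have hmin' : min (n + 1) k = n + 1 := min_eq_left hnk
      have hXbig : (2 : Int) ^ (n + 1) ≤ X :=
        le_trans (pow_le_pow_right₀ (by norm_num) hnk) h1
      have hcontrib : max (0 : Int) (min ((2 : Int) ^ (n + 1) - 1) X - ((2 : Int) ^ n - 1))
          = (2 : Int) ^ n := by
        rw [min_eq_left (by omega)]; omega
      rw [hmin, hmin', pv_band_mask_succ]
      have hcond : ¬ k < n := by omega
      have hcond' : ¬ k < n + 1 := by omega
      rcases pv_band_two_pow N n with hb | hb <;> simp [hb, hcontrib, hcond, hcond']
    · -- n = k : the boundary block contributes X - 2^k + 1 iff bit k is set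
      subst hnk
      have hmin' : min (n + 1) n = n := min_eq_right (by omega)
      have hcontrib : max (0 : Int) (min ((2 : Int) ^ (n + 1) - 1) X - ((2 : Int) ^ n - 1))
          = X - (2 : Int) ^ n + 1 := by
        rw [min_eq_right (by omega)]; omega
      rw [min_self, hmin']
      by_cases hb : PySem.Int.band N ((2 : Int) ^ n) = 0 <;>
        simp [hb, hcontrib, Nat.lt_irrefl, Nat.lt_succ_self]
    · -- n > k : X lies entirely below bit n, contribution 0
      have hmin : min n k = k := min_eq_right (le_of_lt hnk)
      have hmin' : min (n + 1) k = k := min_eq_right (by omega)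
      have hXsmall : X < (2 : Int) ^ n :=
        lt_of_lt_of_le h2 (pow_le_pow_right₀ (by norm_num) hnk)
      have hcontrib : max (0 : Int) (min ((2 : Int) ^ (n + 1) - 1) X - ((2 : Int) ^ n - 1)) = 0 := by
        rw [min_eq_right (by omega)]; omega
      have hcond' : k < n + 1 := by omega
      rw [hmin, hmin']
      by_cases hb : PySem.Int.band N ((2 : Int) ^ n) = 0 <;> simp [hb, hcontrib, hnk, hcond']

-- ===== VERDICT (by name: the statement is the Claim_ definition above) =====
theorem f_spec : Claim_equal_f := by
  intro N X hDom
  unfold Spec_f f f_alt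
  by_cases hX : X ≤ 0
  · rw [if_pos hX]
    have := pv_loop_nonpos N X hX 60
    rw [show ((60 : Nat) : Int) = (60 : Int) by norm_num] at this
    exact this
  · rw [if_neg hX]
    push_neg at hX
    set bl := PySem.Int.bitLength X with hbl
    have hXa : X.natAbs = X.toNat := by omega
    have hbl1 : 1 ≤ bl := by
      by_contra h
      have h0 : bl = 0 := by omega
      have := PySem.Int.lt_two_pow_bitLength X
      rw [← hbl, h0] at this
      simp at this
      omega
    set k : Nat := bl - 1 with hk
    have hlow : (2 : Int) ^ k ≤ X := by
      have h := PySem.Int.two_pow_bitLength_le X (by omega)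
      rw [← hbl] at h
      have : ((2 ^ k : Nat) : Int) ≤ ((X.natAbs : Nat) : Int) := by exact_mod_cast h
      rw [pv_cast_pow] at this
      omega
    have hhigh : X < (2 : Int) ^ (k + 1) := by
      have h := PySem.Int.lt_two_pow_bitLength X
      rw [← hbl, show bl = k + 1 by omega] at h
      have : ((X.natAbs : Nat) : Int) < ((2 ^ (k + 1) : Nat) : Int) := by exact_mod_cast h
      rw [pv_cast_pow] at this
      omega
    have hXbound : X ≤ 2147483648 := by
      unfold Dom_f pvDomInt at hDom
      simp only [Bool.and_eq_true, decide_eq_true_eq] at hDom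
      omega
    have hk31 : k ≤ 31 := by
      by_contra h
      push_neg at h
      have h32 : (2 : Int) ^ 32 ≤ (2 : Int) ^ k := pow_le_pow_right₀ (by norm_num) (by omega)
      have : ((2 : Int) ^ 32) = 4294967296 := by norm_num
      omega
    rw [if_neg (by omega : ¬ 60 ≤ k)]
    have hinv := pv_loop_inv N X k hlow hhigh 60
    rw [min_eq_right (by omega : k ≤ 60),
      show ((60 : Nat) : Int) = (60 : Int) by norm_num] at hinv
    show (PySem.List.pyRange 0 60).foldl (pvBody N X) 0 = _
    rw [hinv]
    simp only [pv_one_shiftLeft]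
    by_cases hb : PySem.Int.band N ((2 : Int) ^ k) = 0 <;>
      simp [hb, show k < 60 by omega]
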